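-- pv_equiv track=rewrite | github.com/BipinRimal314/comply | src/fincompliance/analysis/engine.py | _is_template
-- ===== SOURCE A (Python) =====
-- def _is_template(content: str) -> bool:
--     """Detect if a document is a template (unfilled placeholders)."""
--     content_lower = content.lower()
--     # Strong indicators (any one = template)
--     strong_indicators = [
--         "this template", "this is a template", "sample policy",
--         "model language", "starting point", "[insert ",
--         "[fill in", "[company name]", "[institution name]",
--         "[credit union name]", "[firm name]",
--     ]
--     if any(t in content_lower for t in strong_indicators):
--         return True
--     # Weak indicators (need 2+)
--     weak_indicators = [
--         "[company", "[institution", "(company)", "{company}",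
--         "[your ", "(your ", "___", "[name of",
--         "template", "placeholder", "customize",
--     ]
--     indicator_count = sum(1 for t in weak_indicators if t in content_lower)
--     return indicator_count >= 2
-- ===== SOURCE B (Python) =====
-- def _is_template(content: str) -> bool:
--     """Detect if a document is a template (unfilled placeholders).
--
--     Single weighted table: strong indicators carry weight 2, weak ones weight 1;
--     the document is a template iff the accumulated score reaches 2.
--     """
--     patterns = [
--         ("this template", 2), ("this is a template", 2), ("sample policy", 2),
--         ("model language", 2), ("starting point", 2), ("[insert ", 2),
--         ("[fill in", 2), ("[company name]", 2), ("[institution name]", 2),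
--         ("[credit union name]", 2), ("[firm name]", 2),
--         ("[company", 1), ("[institution", 1), ("(company)", 1), ("{company}", 1),
--         ("[your ", 1), ("(your ", 1), ("___", 1), ("[name of", 1),
--         ("template", 1), ("placeholder", 1), ("customize", 1),
--     ]
--     content_lower = content.lower()
--     score = 0
--     for t, w in patterns:
--         if t in content_lower:
--             score += w
--     return score >= 2
-- ===== Notes on version B (the rewrite author's own statement) =====
-- stated objective: alternative
-- what changed: Replaced the two-tier any()-short-circuit plus thresholded 0/1-sum with a single weighted accumulation over one (pattern, weight) list (strong=2, weak=1, threshold 2).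
import Mathlib
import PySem

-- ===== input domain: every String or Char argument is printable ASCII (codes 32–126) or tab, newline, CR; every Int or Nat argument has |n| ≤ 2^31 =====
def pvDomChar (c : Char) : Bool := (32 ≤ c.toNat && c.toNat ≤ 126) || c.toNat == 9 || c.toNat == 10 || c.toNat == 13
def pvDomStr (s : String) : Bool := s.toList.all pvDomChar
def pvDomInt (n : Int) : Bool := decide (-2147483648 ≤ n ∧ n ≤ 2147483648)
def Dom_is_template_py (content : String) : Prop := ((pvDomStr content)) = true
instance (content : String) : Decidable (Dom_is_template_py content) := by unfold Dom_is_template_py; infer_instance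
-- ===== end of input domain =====

-- B changes the decomposition only: one weighted pass instead of any()+thresholded count; same cost.

-- ===== PORT A =====
def pvStrong : List String :=
  ["this template", "this is a template", "sample policy",
   "model language", "starting point", "[insert ",
   "[fill in", "[company name]", "[institution name]",
   "[credit union name]", "[firm name]"]

def pvWeak : List String :=
  ["[company", "[institution", "(company)", "{company}",
   "[your ", "(your ", "___", "[name of",
   "template", "placeholder", "customize"]

def is_template_py (content : String) : Bool :=
  let contentLower := PySem.Str.lower content
  if pvStrong.any (fun t => PySem.Str.isIn t contentLower) then
    true
  else
    decide (2 ≤ (pvWeak.countP (fun t => PySem.Str.isIn t contentLower) : Int))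

-- ===== PORT B =====
def pvPatterns : List (String × Int) :=
  [("this template", 2), ("this is a template", 2), ("sample policy", 2),
   ("model language", 2), ("starting point", 2), ("[insert ", 2),
   ("[fill in", 2), ("[company name]", 2), ("[institution name]", 2),
   ("[credit union name]", 2), ("[firm name]", 2),
   ("[company", 1), ("[institution", 1), ("(company)", 1), ("{company}", 1),
   ("[your ", 1), ("(your ", 1), ("___", 1), ("[name of", 1),
   ("template", 1), ("placeholder", 1), ("customize", 1)]

def is_template_py_alt (content : String) : Bool :=
  let contentLower := PySem.Str.lower content
  let score : Int := pvPatterns.foldl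
    (fun acc tw => if PySem.Str.isIn tw.1 contentLower then acc + tw.2 else acc) 0
  decide (2 ≤ score)

-- ===== PRECONDITION & SPEC =====
def Spec_is_template_py (content : String) (out : Bool) : Prop := out = is_template_py_alt content
instance (content : String) (out : Bool) : Decidable (Spec_is_template_py content out) := by unfold Spec_is_template_py; infer_instance

-- ===== CLAIM (what is proved, stated in full; the proofs are below) =====
def Claim_equal_is_template_py : Prop := ∀ (content : String), Dom_is_template_py content → Spec_is_template_py content (is_template_py content)

-- ===== LEMMAS AND PROOFS =====

-- B's weighted fold over a constant-weight block counts matches times the weight.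
theorem pv_fold_const_weight (p : String → Bool) (w : Int) (l : List String) (a : Int) :
    (l.map (fun t => (t, w))).foldl
      (fun acc tw => if p tw.1 then acc + tw.2 else acc) a
      = a + w * (l.countP p : Int) := by
  induction l generalizing a with
  | nil => simp
  | cons x xs ih =>
    simp only [List.map_cons, List.foldl_cons, List.countP_cons]
    by_cases h : p x
    · simp [h, ih]; ring
    · simp [h, ih]

-- B's table is exactly the strong block at weight 2 followed by the weak block at weight 1.
theorem pv_patterns_eq :
    pvPatterns = pvStrong.map (fun t => (t, (2:Int))) ++ pvWeak.map (fun t => (t, (1:Int))) := rfl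

theorem pv_key (p : String → Bool) :
    (if pvStrong.any p then true else decide (2 ≤ (pvWeak.countP p : Int)))
      = decide (2 ≤ (pvStrong.map (fun t => (t, (2:Int))) ++ pvWeak.map (fun t => (t, (1:Int)))).foldl
          (fun acc tw => if p tw.1 then acc + tw.2 else acc) 0) := by
  rw [List.foldl_append, pv_fold_const_weight p 2 pvStrong 0, pv_fold_const_weight p 1 pvWeak]
  by_cases hs : pvStrong.any p
  · have h1 : 0 < pvStrong.countP p := by
      rcases List.any_eq_true.mp hs with ⟨x, hx, hpx⟩
      exact List.countP_pos_iff.mpr ⟨x, hx, hpx⟩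
    have hw : (0 : Int) ≤ (pvWeak.countP p : Int) := Int.natCast_nonneg _
    have h1' : (1 : Int) ≤ (pvStrong.countP p : Int) := by exact_mod_cast h1
    simp only [hs, if_true]
    symm; rw [decide_eq_true_iff]; omega
  · have hz : pvStrong.countP p = 0 := by
      rw [List.countP_eq_zero]
      intro x hx
      by_contra hc
      exact hs (List.any_eq_true.mpr ⟨x, hx, by simpa using hc⟩)
    simp only [hs, hz, Nat.cast_zero]
    norm_num

-- ===== VERDICT (by name: the statement is the Claim_ definition above) =====
theorem is_template_py_spec : Claim_equal_is_template_py := by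
  intro content _
  show is_template_py content = is_template_py_alt content
  unfold is_template_py is_template_py_alt
  rw [pv_patterns_eq]
  exact pv_key (fun t => PySem.Str.isIn t (PySem.Str.lower content))
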